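-- pv_equiv track=rewrite | github.com/emilloof/StarCraft-AI-Bot | border_tiles.py | get_offset_coords
-- ===== SOURCE A (Python) =====
-- def get_offset_coords(depth: int) -> list:
--     """ Returns a list of all offset coordinates to a specific depth and tile """
--     offset_coordinates = []
--     for x in range(-depth, depth + 1):
--         for y in range(-depth, depth + 1):
--             if x == depth or x == -depth:
--                 offset_coordinates.append((x, y))
--             else:
--                 if y == depth or y == -depth:
--                     offset_coordinates.append((x, y))
--
--     return offset_coordinates
-- ===== SOURCE B (Python) =====
-- def get_offset_coords(depth: int) -> list:
--     """ Returns a list of all offset coordinates to a specific depth and tile """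
--     if depth < 0:
--         return []
--     if depth == 0:
--         return [(0, 0)]
--     side = list(range(-depth, depth + 1))
--     out = [(-depth, y) for y in side]          # left column
--     for x in range(-depth + 1, depth):         # interior columns: just the two edge rows
--         out.append((x, -depth))
--         out.append((x, depth))
--     out.extend((depth, y) for y in side)       # right column
--     return out
-- ===== Notes on version B (the rewrite author's own statement) =====
-- stated objective: faster
-- what changed: B emits the perimeter cells directly (left column, two edge rows per interior column, right column) instead of scanning the full (2*depth+1)^2 square and filtering.
import Mathlib
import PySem

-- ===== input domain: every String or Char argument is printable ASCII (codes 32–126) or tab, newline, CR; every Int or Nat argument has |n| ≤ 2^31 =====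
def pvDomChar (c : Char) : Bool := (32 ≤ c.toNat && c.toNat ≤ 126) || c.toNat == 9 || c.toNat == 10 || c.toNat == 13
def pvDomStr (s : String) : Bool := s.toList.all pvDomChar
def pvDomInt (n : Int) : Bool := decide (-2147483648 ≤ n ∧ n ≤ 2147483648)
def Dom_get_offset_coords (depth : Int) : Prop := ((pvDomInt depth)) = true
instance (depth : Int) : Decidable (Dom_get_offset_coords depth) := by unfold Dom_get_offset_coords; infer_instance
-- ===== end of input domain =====

-- B emits the perimeter cells directly (left column, interior edge rows, right column) instead of scanning the full square and filtering: O(depth) vs O(depth^2).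

-- ===== PORT A =====
def get_offset_coords (depth : Int) : List (Int × Int) :=
  (PySem.List.pyRange (-depth) (depth + 1) 1).foldl (fun acc x =>
    (PySem.List.pyRange (-depth) (depth + 1) 1).foldl (fun acc2 y =>
      if x = depth ∨ x = -depth then acc2 ++ [(x, y)]
      else if y = depth ∨ y = -depth then acc2 ++ [(x, y)] else acc2) acc) []

-- ===== PORT B =====
def get_offset_coords_alt (depth : Int) : List (Int × Int) :=
  if depth < 0 then []
  else if depth = 0 then [(0, 0)]
  else
    let side := PySem.List.pyRange (-depth) (depth + 1) 1
    (side.map (fun y => (-depth, y)))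
      ++ (PySem.List.pyRange (-depth + 1) depth 1).foldl
           (fun acc x => acc ++ [(x, -depth), (x, depth)]) []
      ++ (side.map (fun y => (depth, y)))

-- ===== PRECONDITION & SPEC =====
def Spec_get_offset_coords (depth : Int) (out : List (Int × Int)) : Prop := out = get_offset_coords_alt depth
instance (depth : Int) (out : List (Int × Int)) : Decidable (Spec_get_offset_coords depth out) := by unfold Spec_get_offset_coords; infer_instance

-- ===== CLAIM (what is proved, stated in full; the proofs are below) =====
def Claim_equal_get_offset_coords : Prop := ∀ (depth : Int), Dom_get_offset_coords depth → Spec_get_offset_coords depth (get_offset_coords depth)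

-- ===== LEMMAS AND PROOFS =====

-- per-column contribution of A, as a function of the column x
def rowA (d x : Int) : List (Int × Int) :=
  if x = d ∨ x = -d then (PySem.List.pyRange (-d) (d + 1) 1).map (fun y => (x, y))
  else [(x, -d), (x, d)]

-- the inner y-loop of A appends exactly rowA d x, for any column inside the range (0 < d)
lemma innerA (d x : Int) (hd : 0 < d) (acc : List (Int × Int)) :
    (PySem.List.pyRange (-d) (d + 1) 1).foldl (fun acc2 y =>
      if x = d ∨ x = -d then acc2 ++ [(x, y)]
      else if y = d ∨ y = -d then acc2 ++ [(x, y)] else acc2) acc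
    = acc ++ rowA d x := by
  by_cases hxe : x = d ∨ x = -d
  · have hb : (fun (acc2 : List (Int × Int)) (y : Int) =>
        if x = d ∨ x = -d then acc2 ++ [(x, y)]
        else if y = d ∨ y = -d then acc2 ++ [(x, y)] else acc2)
        = fun acc2 y => acc2 ++ [(x, y)] := by
      funext acc2 y; simp [if_pos hxe]
    rw [hb, PySem.List.foldl_append_singleton_eq_map, rowA, if_pos hxe]
  · have hb : (fun (acc2 : List (Int × Int)) (y : Int) =>
        if x = d ∨ x = -d then acc2 ++ [(x, y)]
        else if y = d ∨ y = -d then acc2 ++ [(x, y)] else acc2)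
        = fun acc2 y => if y = d ∨ y = -d then acc2 ++ [(x, y)] else acc2 := by
      funext acc2 y; simp [if_neg hxe]
    rw [hb, PySem.List.foldl_append_ite, rowA, if_neg hxe]
    congr 1
    have hsplit : PySem.List.pyRange (-d) (d + 1) 1
        = -d :: (PySem.List.pyRange (-d + 1) d 1 ++ [d]) := by
      rw [PySem.List.pyRange_one_cons (by omega), PySem.List.pyRange_one_succ_right (by omega)]
    rw [hsplit]
    have hmid : (PySem.List.pyRange (-d + 1) d 1).filter (fun y => decide (y = d ∨ y = -d)) = [] := by
      rw [List.filter_eq_nil_iff]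
      intro y hy
      have := (PySem.List.mem_pyRange_one).1 hy
      simp; omega
    rw [List.filter_cons_of_pos (by simp), List.filter_append, hmid,
      List.filter_cons_of_pos (by simp), List.filter_nil]
    rfl

theorem get_offset_coords_spec : Claim_equal_get_offset_coords := by
  intro d _
  show get_offset_coords d = get_offset_coords_alt d
  rcases lt_trichotomy d 0 with hd | hd | hd
  · -- depth < 0 : empty range
    unfold get_offset_coords get_offset_coords_alt
    rw [PySem.List.pyRange_one_eq_nil (by omega)]
    simp [hd]
  · subst hd; decide
  · -- depth > 0 : A = flatMap of rowA over the range, then split the range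
    unfold get_offset_coords get_offset_coords_alt
    rw [if_neg (by omega), if_neg (by omega)]
    have hcongr : ∀ (acc : List (Int × Int)) (x : Int), x ∈ PySem.List.pyRange (-d) (d + 1) 1 →
        (PySem.List.pyRange (-d) (d + 1) 1).foldl (fun acc2 y =>
          if x = d ∨ x = -d then acc2 ++ [(x, y)]
          else if y = d ∨ y = -d then acc2 ++ [(x, y)] else acc2) acc
        = acc ++ rowA d x := by
      intro acc x hx
      have := (PySem.List.mem_pyRange_one).1 hx
      exact innerA d x hd acc
    rw [PySem.List.foldl_congr_mem _ _ (fun acc x => acc ++ rowA d x) _ hcongr]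
    rw [PySem.List.foldl_append_eq_flatMap, List.nil_append]
    have hsplit : PySem.List.pyRange (-d) (d + 1) 1
        = -d :: (PySem.List.pyRange (-d + 1) d 1 ++ [d]) := by
      rw [PySem.List.pyRange_one_cons (by omega), PySem.List.pyRange_one_succ_right (by omega)]
    conv_lhs => rw [hsplit]
    rw [List.flatMap_cons, List.flatMap_append, List.flatMap_cons, List.flatMap_nil]
    have hrow_l : rowA d (-d) = (PySem.List.pyRange (-d) (d + 1) 1).map (fun y => (-d, y)) := by
      rw [rowA, if_pos (Or.inr rfl)]
    have hrow_r : rowA d d = (PySem.List.pyRange (-d) (d + 1) 1).map (fun y => (d, y)) := by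
      rw [rowA, if_pos (Or.inl rfl)]
    have hmid : (PySem.List.pyRange (-d + 1) d 1).flatMap (rowA d)
        = (PySem.List.pyRange (-d + 1) d 1).foldl (fun acc x => acc ++ [(x, -d), (x, d)]) [] := by
      rw [PySem.List.foldl_append_eq_flatMap, List.nil_append]
      apply List.flatMap_congr
      intro x hx
      have := (PySem.List.mem_pyRange_one).1 hx
      rw [rowA, if_neg (by omega)]
    rw [hrow_l, hrow_r, hmid]
    simp
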